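-- pv_equiv track=rewrite | github.com/eliottcassidy2000/math | 04-computation/trace_ocf_bridge.py | hamiltonian_paths_ocf
-- ===== SOURCE A (Python) =====
-- from itertools import combinations
--
-- def hamiltonian_paths_ocf(T):
--     """Compute H(T) via OCF with full odd cycle enumeration."""
--     n = len(T)
--     if n <= 1:
--         return 1
--
--     # Find all odd cycles
--     cycles = []
--     for k in range(3, n+1, 2):
--         for verts in combinations(range(n), k):
--             v = list(verts)
--             dp = [[0]*k for _ in range(1 << k)]
--             dp[1][0] = 1
--             for mask in range(1, 1 << k):
--                 for last in range(k):
--                     if dp[mask][last] == 0 or not (mask & (1 << last)):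
--                         continue
--                     for nxt in range(1, k):
--                         if mask & (1 << nxt):
--                             continue
--                         if T[v[last]][v[nxt]]:
--                             dp[mask | (1 << nxt)][nxt] += dp[mask][last]
--             full = (1 << k) - 1
--             for last in range(1, k):
--                 if T[v[last]][v[0]]:
--                     cnt = dp[full][last]
--                     for _ in range(cnt):
--                         cycles.append(frozenset(verts))
--
--     if not cycles:
--         return 1
--
--     m = len(cycles)
--     # Build conflict graph and compute I(Omega, 2)
--     adj = [0]*m
--     for a in range(m):
--         for b in range(a+1, m):
--             if cycles[a] & cycles[b]:
--                 adj[a] |= 1 << b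
--                 adj[b] |= 1 << a
--
--     # Count independent sets of each size
--     total = 1 + 2*m  # empty + singletons
--     # Size 2
--     pairs = []
--     for a in range(m):
--         for b in range(a+1, m):
--             if not (adj[a] & (1 << b)):
--                 pairs.append((a,b))
--     total += 4 * len(pairs)
--     # Size 3
--     for a, b in pairs:
--         for c in range(b+1, m):
--             if not (adj[a] & (1 << c)) and not (adj[b] & (1 << c)):
--                 total += 8
--     return total
-- ===== SOURCE B (Python) =====
-- from itertools import combinations
--
-- def _weight(T, v):
--     """Total odd-cycle weight of vertex tuple v (same DP as the reference produces per subset)."""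
--     k = len(v)
--     dp = [[0]*k for _ in range(1 << k)]
--     dp[1][0] = 1
--     for mask in range(1, 1 << k):
--         for last in range(k):
--             if dp[mask][last] == 0 or not (mask & (1 << last)):
--                 continue
--             for nxt in range(1, k):
--                 if mask & (1 << nxt):
--                     continue
--                 if T[v[last]][v[nxt]]:
--                     dp[mask | (1 << nxt)][nxt] += dp[mask][last]
--     full = (1 << k) - 1
--     return sum(dp[full][last] for last in range(1, k) if T[v[last]][v[0]])
--
-- def _wsum(gs):
--     return sum(w for _, w in gs)
--
-- def _pairsum(gs):
--     t = 0
--     for i, (S, w) in enumerate(gs):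
--         t += w * _wsum([g for g in gs[i+1:] if not (S & g[0])])
--     return t
--
-- def _triplesum(gs):
--     t = 0
--     for i, (S, w) in enumerate(gs):
--         t += w * _pairsum([g for g in gs[i+1:] if not (S & g[0])])
--     return t
--
-- def hamiltonian_paths_ocf(T):
--     """Weighted count: group identical odd-cycle vertex sets by multiplicity instead of
--     expanding copies; pair/triple sums use products of multiplicities over distinct sets."""
--     n = len(T)
--     groups = []
--     for k in range(3, n+1, 2):
--         for verts in combinations(range(n), k):
--             w = _weight(T, list(verts))
--             if w:
--                 groups.append((frozenset(verts), w))
--     return 1 + 2*_wsum(groups) + 4*_pairsum(groups) + 8*_triplesum(groups)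
-- ===== Notes on version B (the rewrite author's own statement) =====
-- stated objective: faster
-- what changed: B keeps one (vertex-set, multiplicity) entry per distinct odd-cycle subset instead of materializing one copy per cycle, and computes the size-2/size-3 independent-set totals as weighted sums c_i*c_j and c_i*c_j*c_k over distinct disjoint subsets, replacing A's bitmask conflict graph and triple scan over the sum(c_i) expanded copies.
-- outside the precondition, e.g. on hamiltonian_paths_ocf([[0, 0, 0], [0, 0, 0], [0, 0]]): A returns 1, B returns 1
import Mathlib
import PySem

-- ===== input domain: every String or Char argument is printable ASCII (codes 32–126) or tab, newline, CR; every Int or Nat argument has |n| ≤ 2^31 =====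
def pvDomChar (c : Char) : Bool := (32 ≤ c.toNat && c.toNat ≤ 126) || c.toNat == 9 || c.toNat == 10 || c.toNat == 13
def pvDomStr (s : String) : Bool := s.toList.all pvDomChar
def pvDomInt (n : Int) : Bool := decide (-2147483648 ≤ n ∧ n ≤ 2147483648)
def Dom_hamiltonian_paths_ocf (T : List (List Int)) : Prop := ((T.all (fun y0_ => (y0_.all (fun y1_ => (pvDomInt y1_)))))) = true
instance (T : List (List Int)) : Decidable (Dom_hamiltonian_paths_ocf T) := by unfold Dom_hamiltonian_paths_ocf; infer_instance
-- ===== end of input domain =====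

-- B groups the odd-cycle vertex sets by multiplicity and sums c_i·c_j(/·c_k) products over
-- distinct sets instead of expanding copies and scanning all copy pairs and triples.

-- ===== PORT A =====
-- helpers shared by both ports (both Pythons contain the identical subset enumeration and DP):
-- `pvInter s t` = truthiness of `frozenset(s) & frozenset(t)` (nonempty intersection; exact).
def pvInter (s t : List Nat) : Bool := s.any (fun x => t.contains x)

-- itertools.combinations(pool, k), lexicographic order (exact, hand-ported).
def pvCombos : Nat → List Nat → List (List Nat)
  | 0, _ => [[]]
  | _+1, [] => []
  | k+1, x :: xs => (pvCombos k xs).map (fun c => x :: c) ++ pvCombos (k+1) xs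

-- range(3, n+1, 2) (same elements in the same ascending order)
def pvOdds (n : Nat) : List Nat := (List.range (n+1)).filter (fun k => decide (3 ≤ k) && k % 2 == 1)

-- truthiness of T[v[a]][v[b]]; indices are in range on Pre_ (getD defaults never fire there)
def pvEdge (T : List (List Int)) (v : List Nat) (a b : Nat) : Bool :=
  ((T.getD (v.getD a 0) []).getD (v.getD b 0) 0) != 0

-- the bitmask DP table dp of the original, for subset v (identical in both Pythons)
def pvDP (T : List (List Int)) (v : List Nat) : Array (Array Nat) :=
  let k := v.length
  let dp0 : Array (Array Nat) := (Array.replicate (2^k) (Array.replicate k 0)).modify 1 (fun r => r.set! 0 1)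
  (List.range' 1 (2^k - 1)).foldl (fun dp mask =>
    (List.range k).foldl (fun dp last =>
      if (dp.getD mask #[]).getD last 0 == 0 || !(mask.testBit last) then dp
      else (List.range' 1 (k-1)).foldl (fun dp nxt =>
        if mask.testBit nxt then dp
        else if pvEdge T v last nxt then
          dp.modify (mask ||| 2^nxt) (fun row => row.modify nxt (fun c => c + (dp.getD mask #[]).getD last 0))
        else dp) dp) dp) dp0

-- the inner body of A's conflict-graph build
def pvAdjStep (cycles : List (List Nat)) (a : Nat) (adj : Array Nat) (b : Nat) : Array Nat :=
  if pvInter (cycles.getD a []) (cycles.getD b []) then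
    (adj.modify a (fun x => x ||| 2^b)).modify b (fun x => x ||| 2^a)
  else adj

-- A's cycle-enumeration stage (the nested loops filling `cycles`)
def pvCyclesA (T : List (List Int)) : List (List Nat) :=
  (pvOdds T.length).foldl (fun cycles k =>
    (pvCombos k (List.range T.length)).foldl (fun cycles v =>
      let dp := pvDP T v
      (List.range' 1 (k-1)).foldl (fun cycles last =>
        if pvEdge T v last 0 then
          cycles ++ List.replicate ((dp.getD (2^k - 1) #[]).getD last 0) v
        else cycles) cycles) cycles) []

-- A's conflict-graph stage (`adj`)
def pvAdj (cycles : List (List Nat)) : Array Nat :=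
  (List.range cycles.length).foldl (fun adj a =>
    (List.range' (a+1) (cycles.length - (a+1))).foldl (pvAdjStep cycles a) adj)
    (Array.replicate cycles.length 0)

-- A's `pairs` list
def pvPairs (cycles : List (List Nat)) : List (Nat × Nat) :=
  (List.range cycles.length).foldl (fun ps a =>
    (List.range' (a+1) (cycles.length - (a+1))).foldl (fun ps b =>
      if ((pvAdj cycles).getD a 0) &&& 2^b == 0 then ps ++ [(a,b)] else ps) ps) []

-- A's counting stage: `total`, accumulated exactly as in the Python
def pvCountIS (cycles : List (List Nat)) : Int :=
  (pvPairs cycles).foldl (fun tot p =>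
    (List.range' (p.2+1) (cycles.length - (p.2+1))).foldl (fun tot c =>
      if ((pvAdj cycles).getD p.1 0) &&& 2^c == 0 && ((pvAdj cycles).getD p.2 0) &&& 2^c == 0
      then tot + 8 else tot) tot)
    (1 + 2 * (cycles.length : Int) + 4 * ((pvPairs cycles).length : Int))

def hamiltonian_paths_ocf (T : List (List Int)) : Int :=
  if T.length ≤ 1 then 1 else
  if pvCyclesA T = [] then 1 else
  pvCountIS (pvCyclesA T)

-- ===== PORT B =====
-- Source B `_weight`: closes the same DP into the total multiplicity of subset v
def pvWeight (T : List (List Int)) (v : List Nat) : Nat :=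
  let k := v.length
  let dp := pvDP T v
  (List.range' 1 (k-1)).foldl (fun w last =>
    if pvEdge T v last 0 then w + (dp.getD (2^k - 1) #[]).getD last 0 else w) 0

-- the `groups` list of Source B: (vertex set, multiplicity) per distinct subset, zero weights dropped
def pvGroups (T : List (List Int)) : List (List Nat × Nat) :=
  (pvOdds T.length).flatMap (fun k =>
    (pvCombos k (List.range T.length)).filterMap (fun v =>
      if pvWeight T v = 0 then none else some (v, pvWeight T v)))

def pvWsum : List (List Nat × Nat) → Nat
  | [] => 0
  | (_, w) :: rest => w + pvWsum rest

def pvCompat (S : List Nat) (gs : List (List Nat × Nat)) : List (List Nat × Nat) :=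
  gs.filter (fun p => !pvInter S p.1)

def pvPairSum : List (List Nat × Nat) → Nat
  | [] => 0
  | (S, w) :: rest => w * pvWsum (pvCompat S rest) + pvPairSum rest

def pvTripleSum : List (List Nat × Nat) → Nat
  | [] => 0
  | (S, w) :: rest => w * pvPairSum (pvCompat S rest) + pvTripleSum rest

def hamiltonian_paths_ocf_alt (T : List (List Int)) : Int :=
  1 + 2 * (pvWsum (pvGroups T) : Int) + 4 * (pvPairSum (pvGroups T) : Int)
    + 8 * (pvTripleSum (pvGroups T) : Int)

-- ===== PRECONDITION & SPEC =====
-- Pre_ excludes ragged matrices (for n ≥ 3 some row shorter than n): A indexes T[i][j] for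
-- i,j < n and raises IndexError on almost all of them; the few ragged inputs on which the short
-- row happens never to be indexed (so A still returns) are excluded conservatively.
def Pre_hamiltonian_paths_ocf (T : List (List Int)) : Prop :=
  T.length ≤ 2 ∨ ∀ row ∈ T, T.length ≤ row.length
instance (T : List (List Int)) : Decidable (Pre_hamiltonian_paths_ocf T) := by
  unfold Pre_hamiltonian_paths_ocf; infer_instance

def pvWitness_hamiltonian_paths_ocf : List (List Int) := [[0,1,1],[1,0,1],[1,1,0]]

def Spec_hamiltonian_paths_ocf (T : List (List Int)) (out : Int) : Prop := out = hamiltonian_paths_ocf_alt T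
instance (T : List (List Int)) (out : Int) : Decidable (Spec_hamiltonian_paths_ocf T out) := by unfold Spec_hamiltonian_paths_ocf; infer_instance

-- ===== CLAIM (what is proved, stated in full; the proofs are below) =====
def Claim_equal_hamiltonian_paths_ocf : Prop := ∀ (T : List (List Int)), Dom_hamiltonian_paths_ocf T → Pre_hamiltonian_paths_ocf T → Spec_hamiltonian_paths_ocf T (hamiltonian_paths_ocf T)

-- ===== LEMMAS AND PROOFS =====

-- proof-only definitions
def pvF (T : List (List Int)) : List (List Nat × Nat) :=
  (pvOdds T.length).flatMap (fun k =>
    (pvCombos k (List.range T.length)).map (fun v => (v, pvWeight T v)))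

def pvExpand (F : List (List Nat × Nat)) : List (List Nat) :=
  F.flatMap (fun p => List.replicate p.2 p.1)

def pvC1 (S : List Nat) (L : List (List Nat)) : Nat := (L.filter (fun t => !pvInter S t)).length

def pvP2 : List (List Nat) → Nat
  | [] => 0
  | S :: r => pvC1 S r + pvP2 r

def pvP3 : List (List Nat) → Nat
  | [] => 0
  | S :: r => pvP2 (r.filter (fun t => !pvInter S t)) + pvP3 r

def pvE (L : List (List Nat)) (i j : Nat) : Bool := (i != j) && pvInter (L.getD i []) (L.getD j [])

def pvD (L : List (List Nat)) (i j : Nat) : Bool := !pvInter (L.getD i []) (L.getD j [])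

def pvMaskOf (p : Nat → Bool) : Nat → Nat
  | 0 => 0
  | m+1 => (if p m then 2^m else 0) ||| pvMaskOf p m

-- basics
theorem pv_inter_comm (s t : List Nat) : pvInter s t = pvInter t s := by
  unfold pvInter
  by_cases h : ∃ x, x ∈ s ∧ x ∈ t
  · obtain ⟨x, hs, ht⟩ := h
    rw [List.any_eq_true.mpr ⟨x, hs, by simpa using ht⟩,
        List.any_eq_true.mpr ⟨x, ht, by simpa using hs⟩]
  · rw [List.any_eq_false.mpr, List.any_eq_false.mpr]
    · intro x hx
      simp only [List.elem_eq_contains, List.contains_eq_mem, decide_eq_true_eq] at *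
      exact fun hs => h ⟨x, hs, hx⟩
    · intro x hx
      simp only [List.elem_eq_contains, List.contains_eq_mem, decide_eq_true_eq] at *
      exact fun hs => h ⟨x, hx, hs⟩

theorem pv_inter_self (s : List Nat) (h : s ≠ []) : pvInter s s = true := by
  cases s with
  | nil => exact absurd rfl h
  | cons x xs => simp [pvInter]

theorem pv_combos_length {k : Nat} {xs c : List Nat} (h : c ∈ pvCombos k xs) : c.length = k := by
  induction k generalizing xs c with
  | zero => simp [pvCombos] at h; simp [h]
  | succ k ih =>
    induction xs generalizing c with
    | nil => simp [pvCombos] at h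
    | cons x xs ihx =>
      simp only [pvCombos, List.mem_append, List.mem_map] at h
      rcases h with ⟨c', hc', rfl⟩ | h
      · simp [ih hc']
      · exact ihx h

theorem pv_odds_ge {n k : Nat} (h : k ∈ pvOdds n) : 3 ≤ k := by
  unfold pvOdds at h
  simp only [List.mem_filter, Bool.and_eq_true, decide_eq_true_eq] at h
  exact h.2.1

-- fold shapes
theorem pv_foldl_sum_init (l : List Nat) (p : Nat → Bool) (f : Nat → Nat) (w : Nat) :
    l.foldl (fun w last => if p last then w + f last else w) w
      = w + l.foldl (fun w last => if p last then w + f last else w) 0 := by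
  induction l generalizing w with
  | nil => simp
  | cons x xs ih =>
    simp only [List.foldl_cons]
    by_cases h : p x
    · rw [if_pos h, if_pos h, ih (w + f x), ih (0 + f x)]; omega
    · rw [if_neg h, if_neg h, ih w]


theorem pv_foldl_replicate_blocks (l : List Nat) (p : Nat → Bool) (f : Nat → Nat)
    (v : List Nat) (acc : List (List Nat)) :
    l.foldl (fun c last => if p last then c ++ List.replicate (f last) v else c) acc
      = acc ++ List.replicate (l.foldl (fun w last => if p last then w + f last else w) 0) v := by
  induction l generalizing acc with
  | nil => simp
  | cons x xs ih =>
    simp only [List.foldl_cons]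
    by_cases h : p x
    · rw [if_pos h, if_pos h, ih]
      conv_rhs => rw [pv_foldl_sum_init]
      rw [List.replicate_add, ← List.append_assoc, Nat.zero_add]
    · rw [if_neg h, if_neg h, ih]

-- the cycles stage equals the expansion of the (subset, weight) table
theorem pv_cyclesA_eq (T : List (List Int)) : pvCyclesA T = pvExpand (pvF T) := by
  unfold pvCyclesA pvExpand pvF
  rw [List.flatMap_assoc]
  simp only [List.flatMap_map]
  have inner : ∀ k, k ∈ pvOdds T.length → ∀ acc : List (List Nat),
      (pvCombos k (List.range T.length)).foldl (fun cycles v =>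
        (List.range' 1 (k-1)).foldl (fun cycles last =>
          if pvEdge T v last 0 then
            cycles ++ List.replicate (((pvDP T v).getD (2^k - 1) #[]).getD last 0) v
          else cycles) cycles) acc
      = acc ++ (pvCombos k (List.range T.length)).flatMap
          (fun v => List.replicate (pvWeight T v) v) := by
    intro k hk acc
    rw [← PySem.List.foldl_append_eq_flatMap]
    apply PySem.List.foldl_congr_mem
    intro acc' v hv
    rw [pv_foldl_replicate_blocks]
    congr 1
    unfold pvWeight
    rw [pv_combos_length hv]
  trans ([] ++ (pvOdds T.length).flatMap (fun k =>
      (pvCombos k (List.range T.length)).flatMap (fun v => List.replicate (pvWeight T v) v)))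
  · rw [← PySem.List.foldl_append_eq_flatMap]
    exact PySem.List.foldl_congr_mem _ _ _ _ (fun acc k hk => inner k hk acc)
  · rw [List.nil_append]

-- groups vs. the unfiltered table
theorem pv_filterMap_eq (L : List (List Nat)) (w : List Nat → Nat) :
    L.filterMap (fun v => if w v = 0 then none else some (v, w v))
      = (L.map (fun v => (v, w v))).filter (fun p => p.2 != 0) := by
  induction L with
  | nil => rfl
  | cons x xs ih =>
    simp only [List.filterMap_cons, List.map_cons, List.filter_cons]
    by_cases h : w x = 0
    · rw [if_pos h, ih]; simp [h]
    · rw [if_neg h, ih]; simp [h]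

theorem pv_groups_eq (T : List (List Int)) :
    pvGroups T = (pvF T).filter (fun p => p.2 != 0) := by
  unfold pvGroups pvF
  rw [List.filter_flatMap]
  exact List.flatMap_congr (fun k _ => pv_filterMap_eq _ _)

-- zero-weight entries do not change any of B's sums
theorem pv_wsum_filter (l : List (List Nat × Nat)) :
    pvWsum (l.filter (fun p => p.2 != 0)) = pvWsum l := by
  induction l with
  | nil => rfl
  | cons p rest ih =>
    obtain ⟨S, w⟩ := p
    by_cases h : w = 0
    · simp [List.filter_cons, h, pvWsum, ih]
    · simp [List.filter_cons, h, pvWsum, ih]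

theorem pv_compat_filter (S : List Nat) (q : List Nat × Nat → Bool) (l : List (List Nat × Nat)) :
    pvCompat S (l.filter q) = (pvCompat S l).filter q := by
  unfold pvCompat
  rw [List.filter_filter, List.filter_filter]
  exact List.filter_congr (fun p _ => Bool.and_comm _ _)

theorem pv_pairsum_filter (l : List (List Nat × Nat)) :
    pvPairSum (l.filter (fun p => p.2 != 0)) = pvPairSum l := by
  induction l with
  | nil => rfl
  | cons p rest ih =>
    obtain ⟨S, w⟩ := p
    by_cases h : w = 0
    · simp [List.filter_cons, h, pvPairSum, ih]
    · simp only [List.filter_cons]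
      have : ((S, w).2 != 0) = true := by simp [h]
      rw [this, if_pos rfl]
      show w * pvWsum (pvCompat S (rest.filter _)) + pvPairSum (rest.filter _)
          = w * pvWsum (pvCompat S rest) + pvPairSum rest
      rw [pv_compat_filter, pv_wsum_filter, ih]

theorem pv_triplesum_filter (l : List (List Nat × Nat)) :
    pvTripleSum (l.filter (fun p => p.2 != 0)) = pvTripleSum l := by
  induction l with
  | nil => rfl
  | cons p rest ih =>
    obtain ⟨S, w⟩ := p
    by_cases h : w = 0
    · simp [List.filter_cons, h, pvTripleSum, ih]
    · simp only [List.filter_cons]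
      have : ((S, w).2 != 0) = true := by simp [h]
      rw [this, if_pos rfl]
      show w * pvPairSum (pvCompat S (rest.filter _)) + pvTripleSum (rest.filter _)
          = w * pvPairSum (pvCompat S rest) + pvTripleSum rest
      rw [pv_compat_filter, pv_pairsum_filter, ih]

-- B's value in terms of the unfiltered table
theorem pv_alt_eq (T : List (List Int)) :
    hamiltonian_paths_ocf_alt T
      = 1 + 2 * (pvWsum (pvF T) : Int) + 4 * (pvPairSum (pvF T) : Int)
          + 8 * (pvTripleSum (pvF T) : Int) := by
  unfold hamiltonian_paths_ocf_alt
  rw [pv_groups_eq, pv_wsum_filter, pv_pairsum_filter, pv_triplesum_filter]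

-- empty expansion means all weights vanish
theorem pv_expand_nil {F : List (List Nat × Nat)} (h : pvExpand F = []) : pvWsum F = 0 := by
  induction F with
  | nil => rfl
  | cons p rest ih =>
    unfold pvExpand at h
    simp only [List.flatMap_cons, List.append_eq_nil_iff, List.replicate_eq_nil_iff] at h
    show p.2 + pvWsum rest = 0
    rw [h.1, ih h.2]

theorem pv_pairsum_zero {F : List (List Nat × Nat)} (h : pvWsum F = 0) : pvPairSum F = 0 := by
  induction F with
  | nil => rfl
  | cons p rest ih =>
    obtain ⟨S, w⟩ := p
    have hw : w = 0 ∧ pvWsum rest = 0 := by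
      have := h; unfold pvWsum at this; omega
    show w * pvWsum (pvCompat S rest) + pvPairSum rest = 0
    rw [hw.1, ih hw.2]; simp

theorem pv_triplesum_zero {F : List (List Nat × Nat)} (h : pvWsum F = 0) : pvTripleSum F = 0 := by
  induction F with
  | nil => rfl
  | cons p rest ih =>
    obtain ⟨S, w⟩ := p
    have hw : w = 0 ∧ pvWsum rest = 0 := by
      have := h; unfold pvWsum at this; omega
    show w * pvPairSum (pvCompat S rest) + pvTripleSum rest = 0
    rw [hw.1, ih hw.2]; simp

theorem pv_length_expand (F : List (List Nat × Nat)) : (pvExpand F).length = pvWsum F := by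
  induction F with
  | nil => rfl
  | cons p rest ih =>
    unfold pvExpand at ih ⊢
    simp only [List.flatMap_cons, List.length_append, List.length_replicate, ih]
    rfl

theorem pv_expand_filter (F : List (List Nat × Nat)) (q : List Nat → Bool) :
    (pvExpand F).filter q = pvExpand (F.filter (fun p => q p.1)) := by
  induction F with
  | nil => rfl
  | cons p rest ih =>
    unfold pvExpand at ih ⊢
    simp only [List.flatMap_cons, List.filter_append, List.filter_cons, ih]
    by_cases h : q p.1
    · rw [if_pos h, List.filter_replicate, if_pos h]; rfl
    · rw [if_neg h, List.filter_replicate, if_neg (by simp [h])]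
      simp

-- size-2 / size-3 independent-set counts across a replicate block
theorem pv_P2_rep (S : List Nat) (hS : S ≠ []) (w : Nat) (L : List (List Nat)) :
    pvP2 (List.replicate w S ++ L) = w * pvC1 S L + pvP2 L := by
  induction w with
  | zero => simp
  | succ w ih =>
    rw [List.replicate_succ, List.cons_append]
    show pvC1 S (List.replicate w S ++ L) + pvP2 (List.replicate w S ++ L) = _
    have hc : pvC1 S (List.replicate w S ++ L) = pvC1 S L := by
      unfold pvC1
      rw [List.filter_append, List.filter_replicate, if_neg (by simp [pv_inter_self S hS])]
      simp
    rw [hc, ih, Nat.succ_mul]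
    omega

theorem pv_P2_expand (F : List (List Nat × Nat)) (h : ∀ p ∈ F, p.1 ≠ []) :
    pvP2 (pvExpand F) = pvPairSum F := by
  induction F with
  | nil => rfl
  | cons p rest ih =>
    obtain ⟨S, w⟩ := p
    show pvP2 (pvExpand ((S, w) :: rest)) = w * pvWsum (pvCompat S rest) + pvPairSum rest
    unfold pvExpand
    simp only [List.flatMap_cons]
    rw [pv_P2_rep S (h (S, w) List.mem_cons_self) w]
    have hc : pvC1 S (List.flatMap (fun p => List.replicate p.2 p.1) rest)
        = pvWsum (pvCompat S rest) := by
      unfold pvC1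
      rw [show List.flatMap (fun p => List.replicate p.2 p.1) rest = pvExpand rest from rfl,
          pv_expand_filter, ← pv_length_expand]
      rfl
    rw [hc, show List.flatMap (fun p => List.replicate p.2 p.1) rest = pvExpand rest from rfl,
        ih (fun q hq => h q (List.mem_cons_of_mem _ hq))]

theorem pv_P3_rep (S : List Nat) (hS : S ≠ []) (w : Nat) (L : List (List Nat)) :
    pvP3 (List.replicate w S ++ L)
      = w * pvP2 (L.filter (fun t => !pvInter S t)) + pvP3 L := by
  induction w with
  | zero => simp
  | succ w ih =>
    rw [List.replicate_succ, List.cons_append]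
    show pvP2 ((List.replicate w S ++ L).filter _) + pvP3 (List.replicate w S ++ L) = _
    rw [List.filter_append, List.filter_replicate, if_neg (by simp [pv_inter_self S hS])]
    simp only [List.nil_append]
    rw [ih, Nat.succ_mul]
    omega

theorem pv_P3_expand (F : List (List Nat × Nat)) (h : ∀ p ∈ F, p.1 ≠ []) :
    pvP3 (pvExpand F) = pvTripleSum F := by
  induction F with
  | nil => rfl
  | cons p rest ih =>
    obtain ⟨S, w⟩ := p
    show pvP3 (pvExpand ((S, w) :: rest)) = w * pvPairSum (pvCompat S rest) + pvTripleSum rest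
    unfold pvExpand
    simp only [List.flatMap_cons]
    rw [pv_P3_rep S (h (S, w) List.mem_cons_self) w]
    have hc : pvP2 ((List.flatMap (fun p => List.replicate p.2 p.1) rest).filter
          (fun t => !pvInter S t)) = pvPairSum (pvCompat S rest) := by
      rw [show List.flatMap (fun p => List.replicate p.2 p.1) rest = pvExpand rest from rfl,
          pv_expand_filter]
      exact pv_P2_expand _ (fun q hq => h q (List.mem_cons_of_mem _ (List.mem_of_mem_filter hq)))
    rw [hc, show List.flatMap (fun p => List.replicate p.2 p.1) rest = pvExpand rest from rfl,
        ih (fun q hq => h q (List.mem_cons_of_mem _ hq))]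

-- every enumerated subset is nonempty (size ≥ 3)
theorem pv_F_ne_nil (T : List (List Int)) : ∀ p ∈ pvF T, p.1 ≠ [] := by
  intro p hp
  unfold pvF at hp
  simp only [List.mem_flatMap, List.mem_map] at hp
  obtain ⟨k, hk, v, hv, rfl⟩ := hp
  have h3 := pv_odds_ge hk
  have hl := pv_combos_length hv
  intro hnil
  have hv0 : v = [] := hnil
  rw [hv0] at hl
  simp at hl
  omega

theorem pv_odds_small {n : Nat} (h : n ≤ 2) : pvOdds n = [] := by
  unfold pvOdds
  rw [List.filter_eq_nil_iff]
  intro k hk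
  simp only [List.mem_range] at hk
  simp only [Bool.and_eq_true, decide_eq_true_eq, beq_iff_eq, not_and]
  intro h3
  omega

-- bitmask helpers
theorem pv_maskOf_congr : ∀ (m : Nat) {p q : Nat → Bool},
    (∀ j, j < m → p j = q j) → pvMaskOf p m = pvMaskOf q m := by
  intro m
  induction m with
  | zero => intro p q _; rfl
  | succ m ih =>
    intro p q h
    unfold pvMaskOf
    rw [h m (by omega), ih (fun j hj => h j (by omega))]

theorem pv_testBit_maskOf (p : Nat → Bool) : ∀ (m j : Nat),
    (pvMaskOf p m).testBit j = (decide (j < m) && p j) := by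
  intro m
  induction m with
  | zero => intro j; simp [pvMaskOf]
  | succ m ih =>
    intro j
    unfold pvMaskOf
    rw [Nat.testBit_or, ih]
    by_cases hj : j = m
    · subst hj
      by_cases hp : p j <;> simp [hp, Nat.testBit_two_pow]
    · have h1 : (decide (j < m)) = (decide (j < m + 1)) := by
        by_cases h : j < m
        · simp [h, show j < m + 1 by omega]
        · simp [h, show ¬ (j < m + 1) from by omega]
      by_cases hp : p m <;>
        simp [hp, Nat.testBit_two_pow, Ne.symm hj, h1]

theorem pv_maskOf_false : ∀ m : Nat, pvMaskOf (fun _ => false) m = 0 := by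
  intro m; induction m with
  | zero => rfl
  | succ m ih => unfold pvMaskOf; rw [ih]; simp

theorem pv_maskOf_or (p : Nat → Bool) (m b : Nat) (hb : b < m) :
    pvMaskOf p m ||| 2^b = pvMaskOf (fun j => p j || j == b) m := by
  apply Nat.eq_of_testBit_eq
  intro i
  rw [Nat.testBit_or, pv_testBit_maskOf, pv_testBit_maskOf, Nat.testBit_two_pow]
  by_cases hib : i = b
  · subst hib; simp [hb]
  · rw [show (i == b) = false from by simp [hib], Bool.or_false,
        show (decide (b = i)) = false from by simp [Ne.symm hib], Bool.or_false]

-- array access helpers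
theorem pv_getD_replicate (m i : Nat) : (Array.replicate m (0:Nat)).getD i 0 = 0 := by
  rw [Array.getD_eq_getD_getElem?]
  by_cases h : i < m
  · simp [h]
  · rw [Array.getElem?_eq_none (by simpa using h)]; rfl

theorem pv_getD_modify (A : Array Nat) (i j : Nat) (f : Nat → Nat) (hj : j < A.size) :
    (A.modify i f).getD j 0 = if i = j then f (A.getD j 0) else A.getD j 0 := by
  rw [Array.getD_eq_getD_getElem?, Array.getD_eq_getD_getElem?, Array.getElem?_modify,
      Array.getElem?_eq_getElem hj]
  by_cases h : i = j <;> simp [h]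

-- the conflict-graph invariant: after processing, row i holds exactly the conflicting columns
theorem pv_adj_inner (L : List (List Nat)) (a : Nat) (ha : a < L.length) :
    ∀ (t : Nat) (A : Array Nat), a + 1 + t ≤ L.length →
    A.size = L.length →
    (∀ i, i < L.length → A.getD i 0
        = pvMaskOf (fun j => pvE L i j && decide (min i j < a)) L.length) →
    ((List.range' (a+1) t).foldl (pvAdjStep L a) A).size = L.length ∧
    ∀ i, i < L.length → ((List.range' (a+1) t).foldl (pvAdjStep L a) A).getD i 0
        = pvMaskOf (fun j => pvE L i j
            && decide (min i j < a ∨ (min i j = a ∧ max i j < a+1+t))) L.length := by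
  intro t
  induction t with
  | zero =>
    intro A hlen hsz hrow
    simp only [List.range'_zero, List.foldl_nil]
    refine ⟨hsz, fun i hi => ?_⟩
    rw [hrow i hi]
    apply pv_maskOf_congr
    intro j hj
    by_cases hE : pvE L i j
    · have hij : i ≠ j := by
        unfold pvE at hE
        simp only [Bool.and_eq_true, bne_iff_ne] at hE
        exact hE.1
      rw [hE]
      simp only [Bool.true_and]
      rw [decide_eq_decide.mpr]
      omega
    · simp only [Bool.not_eq_true] at hE
      rw [hE]
      simp
  | succ t ih =>
    intro A hlen hsz hrow
    have hbm : a + 1 + t < L.length := by omega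
    rw [show List.range' (a+1) (t+1) = List.range' (a+1) t ++ [a+1+t] from by
          rw [List.range'_concat]; simp]
    rw [List.foldl_append]
    obtain ⟨bsz, brow⟩ := ih A (by omega) hsz hrow
    set B := (List.range' (a+1) t).foldl (pvAdjStep L a) A with hB
    simp only [List.foldl_cons, List.foldl_nil]
    unfold pvAdjStep
    by_cases hI : pvInter (L.getD a []) (L.getD (a+1+t) []) = true
    · rw [if_pos hI]
      have hszB1 : (B.modify a (fun x => x ||| 2 ^ (a+1+t))).size = L.length := by
        rw [Array.size_modify, bsz]
      refine ⟨by rw [Array.size_modify, hszB1], fun i hi => ?_⟩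
      have h1 := pv_getD_modify (B.modify a (fun x => x ||| 2 ^ (a+1+t))) (a+1+t) i
          (fun x => x ||| 2 ^ a) (by rw [hszB1]; exact hi)
      have h2 := pv_getD_modify B a i (fun x => x ||| 2 ^ (a+1+t)) (by rw [bsz]; exact hi)
      rw [h1, h2]
      by_cases hib : a + 1 + t = i
      · -- row b := a+1+t gains bit a
        rw [if_pos hib, if_neg (by omega)]
        show B.getD i 0 ||| 2 ^ a = _
        rw [brow i hi, pv_maskOf_or _ _ a ha]
        apply pv_maskOf_congr
        intro j hj
        by_cases hja : j = a
        · have hEia : pvE L i j = true := by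
            unfold pvE
            rw [pv_inter_comm] at hI
            rw [hja, ← hib]
            rw [hib] at hI
            rw [hib]
            simp only [hI, Bool.and_true]
            simp only [bne_iff_ne, ne_eq, decide_eq_true_eq]
            omega
          rw [hEia, show (j == a) = true from by simp [hja], Bool.or_true,
              Bool.true_and, decide_eq_true]
          omega
        · rw [show (j == a) = false from by simp [hja], Bool.or_false]
          by_cases hE : pvE L i j
          · have hij : i ≠ j := by
              unfold pvE at hE
              simp only [Bool.and_eq_true, bne_iff_ne] at hE
              exact hE.1
            rw [hE]
            simp only [Bool.true_and]
            rw [decide_eq_decide.mpr]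
            omega
          · simp only [Bool.not_eq_true] at hE
            rw [hE]; simp
      · rw [if_neg hib]
        by_cases hia : a = i
        · -- row a gains bit b := a+1+t
          rw [if_pos hia]
          show B.getD i 0 ||| 2 ^ (a+1+t) = _
          rw [brow i hi, pv_maskOf_or _ _ (a+1+t) hbm]
          apply pv_maskOf_congr
          intro j hj
          by_cases hjb : j = a + 1 + t
          · have hEab : pvE L i j = true := by
              unfold pvE
              rw [hjb, ← hia]
              simp only [hI, Bool.and_true]
              simp only [bne_iff_ne, ne_eq, decide_eq_true_eq]
              omega
            rw [hEab, show (j == a+1+t) = true from by simp [hjb], Bool.or_true,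
                Bool.true_and, decide_eq_true]
            omega
          · rw [show (j == a+1+t) = false from by simp [hjb], Bool.or_false]
            by_cases hE : pvE L i j
            · have hij : i ≠ j := by
                unfold pvE at hE
                simp only [Bool.and_eq_true, bne_iff_ne] at hE
                exact hE.1
              rw [hE]
              simp only [Bool.true_and]
              rw [decide_eq_decide.mpr]
              omega
            · simp only [Bool.not_eq_true] at hE
              rw [hE]; simp
        · -- untouched row
          rw [if_neg hia, brow i hi]
          apply pv_maskOf_congr
          intro j hj
          by_cases hE : pvE L i j
          · have hij : i ≠ j := by
              unfold pvE at hE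
              simp only [Bool.and_eq_true, bne_iff_ne] at hE
              exact hE.1
            rw [hE]
            simp only [Bool.true_and]
            rw [decide_eq_decide.mpr]
            constructor
            · intro h; omega
            · intro h
              rcases h with h | h
              · omega
              · -- min = a forces j = a (since i ≠ a); then max = i < a+1+t+1 with i ≠ a+1+t
                omega
          · simp only [Bool.not_eq_true] at hE
            rw [hE]; simp
    · rw [if_neg hI]
      refine ⟨bsz, fun i hi => ?_⟩
      rw [brow i hi]
      apply pv_maskOf_congr
      intro j hj
      by_cases hE : pvE L i j
      · have hij : i ≠ j := by
          unfold pvE at hE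
          simp only [Bool.and_eq_true, bne_iff_ne] at hE
          exact hE.1
        have hEI : pvInter (L.getD i []) (L.getD j []) = true := by
          unfold pvE at hE
          simp only [Bool.and_eq_true] at hE
          exact hE.2
        have hnotab : ¬ (min i j = a ∧ max i j = a + 1 + t) := by
          rintro ⟨h1, h2⟩
          rcases Nat.le_total i j with hle | hle
          · have hia : i = a := by omega
            have hjb : j = a + 1 + t := by omega
            rw [hia, hjb] at hEI
            exact hI hEI
          · have hja : j = a := by omega
            have hib2 : i = a + 1 + t := by omega
            rw [pv_inter_comm] at hEI
            rw [hja, hib2] at hEI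
            exact hI hEI
        rw [hE]
        simp only [Bool.true_and]
        rw [decide_eq_decide.mpr]
        omega
      · simp only [Bool.not_eq_true] at hE
        rw [hE]; simp

theorem pv_adj_outer (L : List (List Nat)) : ∀ (u : Nat), u ≤ L.length →
    ((List.range u).foldl (fun adj a =>
        (List.range' (a+1) (L.length - (a+1))).foldl (pvAdjStep L a) adj)
      (Array.replicate L.length 0)).size = L.length ∧
    ∀ i, i < L.length → ((List.range u).foldl (fun adj a =>
        (List.range' (a+1) (L.length - (a+1))).foldl (pvAdjStep L a) adj)
      (Array.replicate L.length 0)).getD i 0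
        = pvMaskOf (fun j => pvE L i j && decide (min i j < u)) L.length := by
  intro u
  induction u with
  | zero =>
    intro _
    refine ⟨by simp, fun i hi => ?_⟩
    simp only [List.range_zero, List.foldl_nil]
    rw [pv_getD_replicate]
    rw [pv_maskOf_congr L.length (q := fun _ => false) (fun j hj => by simp),
        pv_maskOf_false]
  | succ u ih =>
    intro hu
    obtain ⟨psz, prow⟩ := ih (by omega)
    rw [List.range_succ, List.foldl_append]
    simp only [List.foldl_cons, List.foldl_nil]
    have hrec : u + 1 + (L.length - (u+1)) ≤ L.length := by omega
    obtain ⟨qsz, qrow⟩ := pv_adj_inner L u (by omega) (L.length - (u+1)) _ hrec psz prow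
    refine ⟨qsz, fun i hi => ?_⟩
    rw [qrow i hi]
    apply pv_maskOf_congr
    intro j hj
    by_cases hE : pvE L i j
    · rw [hE]
      simp only [Bool.true_and]
      rw [decide_eq_decide.mpr]
      omega
    · simp only [Bool.not_eq_true] at hE
      rw [hE]; simp

-- the bit test performed by A's pair/triple loops, in terms of set intersection
theorem pv_adj_read (L : List (List Nat)) (a b : Nat) (ha : a < L.length) (hb : b < L.length) :
    (((pvAdj L).getD a 0) &&& 2^b == 0) = !(pvE L a b) := by
  unfold pvAdj
  rw [(pv_adj_outer L L.length (le_refl _)).2 a ha, Nat.and_two_pow, pv_testBit_maskOf]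
  rw [show (decide (b < L.length)) = true from by rw [decide_eq_true]; exact hb,
      show (decide (min a b < L.length)) = true from by rw [decide_eq_true]; omega]
  simp only [Bool.true_and, Bool.and_true]
  by_cases hE : pvE L a b
  · rw [hE]
    have h2 : (2:Nat)^b ≠ 0 := by positivity
    simp [h2]
  · simp only [Bool.not_eq_true] at hE
    rw [hE]
    simp

-- index-level counting helpers
def pvCntPair (L : List (List Nat)) (a : Nat) : Nat :=
  ((List.range' (a+1) (L.length-(a+1))).filter (fun b => pvD L a b)).length

def pvCntTri (L : List (List Nat)) (a b : Nat) : Nat :=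
  ((List.range' (b+1) (L.length-(b+1))).filter (fun c => pvD L a c && pvD L b c)).length

theorem pv_adj_read' (L : List (List Nat)) {a c : Nat} (ha : a < L.length) (hc : c < L.length)
    (hne : a ≠ c) : (((pvAdj L).getD a 0) &&& 2^c == 0) = pvD L a c := by
  rw [pv_adj_read L a c ha hc]
  unfold pvE pvD
  rw [show (a != c) = true from by simp [hne], Bool.true_and]

-- A's pairs list is the list of all index pairs a < b with disjoint sets
theorem pv_pairs_eq (L : List (List Nat)) :
    pvPairs L = (List.range L.length).flatMap (fun a =>
      ((List.range' (a+1) (L.length-(a+1))).filter (fun b => pvD L a b)).map (fun b => (a,b))) := by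
  unfold pvPairs
  trans ([] ++ (List.range L.length).flatMap (fun a =>
      ((List.range' (a+1) (L.length-(a+1))).filter (fun b => pvD L a b)).map (fun b => (a,b))))
  · rw [← PySem.List.foldl_append_eq_flatMap]
    apply PySem.List.foldl_congr_mem
    intro acc a hmem
    rw [List.mem_range] at hmem
    rw [PySem.List.foldl_congr_mem _ _
        (fun ps b => if pvD L a b then ps ++ [(a,b)] else ps) _ ?hcongr]
    case hcongr =>
      intro ps b hb
      rw [List.mem_range'_1] at hb
      rw [pv_adj_read' L hmem (by omega) (by omega)]
    exact PySem.List.foldl_append_if _ _ _ _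
  · rw [List.nil_append]

-- counting over an index range equals counting over the dropped suffix
theorem pv_count_range' (L : List (List Nat)) (q : List Nat → Bool) :
    ∀ (t s : Nat), s + t = L.length →
    ((List.range' s t).filter (fun b => q (L.getD b []))).length
      = ((L.drop s).filter q).length := by
  intro t
  induction t with
  | zero =>
    intro s hs
    rw [List.drop_of_length_le (by omega)]
    rfl
  | succ t ih =>
    intro s hs
    have hslt : s < L.length := by omega
    rw [List.range'_succ, List.drop_eq_getElem_cons hslt]
    simp only [List.filter_cons]
    rw [List.getD_eq_getElem L [] hslt]
    by_cases hq : q L[s]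
    · rw [if_pos hq, if_pos hq]
      simp only [List.length_cons]
      rw [ih (s+1) (by omega)]
    · rw [if_neg hq, if_neg hq, ih (s+1) (by omega)]

-- Σ_a pvCntPair = pvP2 of the suffix
theorem pv_sumP2 (L : List (List Nat)) :
    ∀ (t s : Nat), s + t = L.length →
    ((List.range' s t).map (pvCntPair L)).sum = pvP2 (L.drop s) := by
  intro t
  induction t with
  | zero =>
    intro s hs
    rw [List.drop_of_length_le (by omega)]
    rfl
  | succ t ih =>
    intro s hs
    have hslt : s < L.length := by omega
    rw [List.range'_succ, List.drop_eq_getElem_cons hslt]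
    simp only [List.map_cons, List.sum_cons]
    show pvCntPair L s + _ = pvC1 L[s] (L.drop (s+1)) + pvP2 (L.drop (s+1))
    rw [ih (s+1) (by omega)]
    congr 1
    unfold pvCntPair pvC1
    have := pv_count_range' L (fun u => !pvInter L[s] u) t (s+1) (by omega)
    rw [show L.length - (s+1) = t from by omega]
    rw [← this]
    apply congrArg
    apply List.filter_congr
    intro b _
    unfold pvD
    rw [List.getD_eq_getElem L [] hslt]

-- the generalized pair count under a pre-filter
theorem pv_G2 (L : List (List Nat)) (q : List Nat → Bool) :
    ∀ (t s : Nat), s + t = L.length →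
    (((List.range' s t).filter (fun b => q (L.getD b []))).map (fun b =>
        ((List.range' (b+1) (L.length-(b+1))).filter
          (fun c => q (L.getD c []) && pvD L b c)).length)).sum
      = pvP2 ((L.drop s).filter q) := by
  intro t
  induction t with
  | zero =>
    intro s hs
    rw [List.drop_of_length_le (by omega)]
    rfl
  | succ t ih =>
    intro s hs
    have hslt : s < L.length := by omega
    rw [List.range'_succ, List.drop_eq_getElem_cons hslt]
    simp only [List.filter_cons]
    by_cases hq : q (L.getD s [])
    · rw [if_pos hq, if_pos (by rw [← List.getD_eq_getElem L [] hslt]; exact hq)]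
      simp only [List.map_cons, List.sum_cons]
      show _ + _ = pvC1 L[s] ((L.drop (s+1)).filter q) + pvP2 ((L.drop (s+1)).filter q)
      rw [ih (s+1) (by omega)]
      congr 1
      unfold pvC1
      rw [List.filter_filter]
      have := pv_count_range' L (fun u => !pvInter L[s] u && q u) t (s+1) (by omega)
      rw [show L.length - (s+1) = t from by omega, ← this]
      apply congrArg
      apply List.filter_congr
      intro c _
      unfold pvD
      rw [List.getD_eq_getElem L [] hslt]
      rw [Bool.and_comm]
    · rw [if_neg hq, if_neg (by rw [← List.getD_eq_getElem L [] hslt]; exact hq)]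
      exact ih (s+1) (by omega)

-- Σ_a Σ_b pvCntTri = pvP3 of the suffix
theorem pv_G3 (L : List (List Nat)) :
    ∀ (t s : Nat), s + t = L.length →
    ((List.range' s t).map (fun a =>
        (((List.range' (a+1) (L.length-(a+1))).filter (fun b => pvD L a b)).map
          (pvCntTri L a)).sum)).sum
      = pvP3 (L.drop s) := by
  intro t
  induction t with
  | zero =>
    intro s hs
    rw [List.drop_of_length_le (by omega)]
    rfl
  | succ t ih =>
    intro s hs
    have hslt : s < L.length := by omega
    rw [List.range'_succ, List.drop_eq_getElem_cons hslt]
    simp only [List.map_cons, List.sum_cons]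
    show _ + _ = pvP2 ((L.drop (s+1)).filter (fun u => !pvInter L[s] u)) + pvP3 (L.drop (s+1))
    rw [ih (s+1) (by omega)]
    congr 1
    have hg2 := pv_G2 L (fun u => !pvInter L[s] u) t (s+1) (by omega)
    simp only [] at hg2
    rw [show L.length - (s+1) = t from by omega]
    rw [← hg2]
    have hfl : (List.range' (s+1) t).filter (fun b => pvD L s b)
        = (List.range' (s+1) t).filter (fun b => !pvInter L[s] (L.getD b [])) := by
      apply List.filter_congr
      intro b _
      unfold pvD
      rw [List.getD_eq_getElem L [] hslt]
    rw [hfl]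
    refine congrArg List.sum ?_
    apply List.map_congr_left
    intro b _
    unfold pvCntTri
    apply congrArg
    apply List.filter_congr
    intro c _
    unfold pvD
    rw [List.getD_eq_getElem L [] hslt]

-- fold shapes for the size-3 loop
theorem pv_foldl_if8 (l : List Nat) (p : Nat → Bool) :
    ∀ (t : Int), l.foldl (fun tot c => if p c then tot + 8 else tot) t
      = t + 8 * (l.countP p : Int) := by
  induction l with
  | nil => intro t; simp
  | cons x xs ih =>
    intro t
    simp only [List.foldl_cons, List.countP_cons]
    by_cases h : p x
    · rw [if_pos h, ih]
      simp [h]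
      push_cast
      ring
    · rw [if_neg h, ih]
      simp [h]

theorem pv_sum_flatMap' {α β : Type} [AddCommMonoid β] (l : List α) (f : α → List β) :
    ((l.flatMap f).sum) = (l.map (fun x => (f x).sum)).sum := by
  induction l with
  | nil => rfl
  | cons x xs ih =>
    simp only [List.flatMap_cons, List.sum_append, List.map_cons, List.sum_cons, ih]

theorem pv_sum_mul8 {α : Type} (l : List α) (f : α → Nat) :
    (l.map (fun x => (8:Int) * (f x : Int))).sum = 8 * ((l.map f).sum : Int) := by
  induction l with
  | nil => simp
  | cons x xs ih =>
    simp only [List.map_cons, List.sum_cons, ih]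
    push_cast
    ring

-- A's counting stage equals the structural counts
set_option maxHeartbeats 1000000 in
theorem pv_countIS_eq (L : List (List Nat)) :
    pvCountIS L = 1 + 2 * (L.length : Int) + 4 * (pvP2 L : Int) + 8 * (pvP3 L : Int) := by
  have hlen : ((pvPairs L).length : Int) = (pvP2 L : Int) := by
    have h : (pvPairs L).length = pvP2 L := by
      rw [pv_pairs_eq, List.length_flatMap]
      simp only [List.length_map]
      rw [List.range_eq_range']
      have := pv_sumP2 L L.length 0 (by omega)
      rw [List.drop_zero] at this
      rw [← this]
      rfl
    exact congrArg (fun n : Nat => (n : Int)) h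
  unfold pvCountIS
  have hbody : ∀ (tot : Int) (p : Nat × Nat), p ∈ pvPairs L →
      (List.range' (p.2+1) (L.length - (p.2+1))).foldl (fun tot c =>
        if ((pvAdj L).getD p.1 0) &&& 2^c == 0 && ((pvAdj L).getD p.2 0) &&& 2^c == 0
        then tot + 8 else tot) tot
      = tot + 8 * (pvCntTri L p.1 p.2 : Int) := by
    intro tot p hp
    rw [pv_pairs_eq] at hp
    simp only [List.mem_flatMap, List.mem_map, List.mem_filter] at hp
    obtain ⟨a, ha, b, ⟨hbr, hbd⟩, rfl⟩ := hp
    rw [List.mem_range] at ha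
    rw [List.mem_range'_1] at hbr
    rw [PySem.List.foldl_congr_mem _ _
        (fun tot c => if pvD L a c && pvD L b c then tot + 8 else tot) _ ?hc]
    case hc =>
      intro tot' c hc
      rw [List.mem_range'_1] at hc
      rw [pv_adj_read' L (by omega) (by omega) (by omega),
          pv_adj_read' L (by omega) (by omega) (by omega)]
    rw [pv_foldl_if8, List.countP_eq_length_filter]
    rfl
  rw [PySem.List.foldl_congr_mem _ _
      (fun tot p => tot + 8 * (pvCntTri L p.1 p.2 : Int)) _ hbody]
  rw [PySem.List.foldl_add (pvPairs L) (fun p => 8 * (pvCntTri L p.1 p.2 : Int))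
      (1 + 2 * (L.length : Int) + 4 * ((pvPairs L).length : Int))]
  have hsum : ((pvPairs L).map (fun p => 8 * (pvCntTri L p.1 p.2 : Int))).sum
      = 8 * (pvP3 L : Int) := by
    rw [pv_pairs_eq, List.map_flatMap]
    rw [pv_sum_flatMap']
    have hinner : ∀ a, ((((List.range' (a+1) (L.length-(a+1))).filter (fun b => pvD L a b)).map
          (fun b => (a, b))).map (fun p => 8 * (pvCntTri L p.1 p.2 : Int))).sum
        = 8 * ((((List.range' (a+1) (L.length-(a+1))).filter (fun b => pvD L a b)).map
            (pvCntTri L a)).sum : Int) := by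
      intro a
      rw [List.map_map]
      exact pv_sum_mul8 _ _
    rw [List.map_congr_left (fun a _ => hinner a)]
    rw [pv_sum_mul8 (List.range L.length)
        (fun a => (((List.range' (a+1) (L.length-(a+1))).filter (fun b => pvD L a b)).map
          (pvCntTri L a)).sum)]
    rw [List.range_eq_range']
    have := pv_G3 L L.length 0 (by omega)
    rw [List.drop_zero] at this
    rw [this]
  rw [hsum, hlen]

-- ===== VERDICT (by name: the statement is the Claim_ definition above) =====
theorem hamiltonian_paths_ocf_spec : Claim_equal_hamiltonian_paths_ocf := by
  intro T _ _
  unfold Spec_hamiltonian_paths_ocf hamiltonian_paths_ocf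
  by_cases h1 : T.length ≤ 1
  · rw [if_pos h1]
    have hodds : pvOdds T.length = [] := pv_odds_small (by omega)
    unfold hamiltonian_paths_ocf_alt pvGroups
    rw [hodds]
    norm_num [pvWsum, pvPairSum, pvTripleSum]
  · rw [if_neg h1]
    by_cases h2 : pvCyclesA T = []
    · rw [if_pos h2, pv_alt_eq]
      rw [pv_cyclesA_eq] at h2
      have hw := pv_expand_nil h2
      rw [hw, pv_pairsum_zero hw, pv_triplesum_zero hw]
      norm_num
    · rw [if_neg h2, pv_countIS_eq, pv_cyclesA_eq, pv_length_expand,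
          pv_P2_expand _ (pv_F_ne_nil T), pv_P3_expand _ (pv_F_ne_nil T), pv_alt_eq]
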